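-- pv_equiv track=rewrite | github.com/RobinSuxdorf/projektpraktikum-ws24-quality-of-wikipedia-articles | preserved_experiments/TestsGramSchmidtVerfahren.py | create_lexicon_for_the_words
-- ===== SOURCE A (Python) =====
-- def create_lexicon_for_the_words(list_words):
--     """Creates a lexicon to store each word"""
--     lexicon = {}
--     current_word = 0
--     for article in list_words:
--         for word in article.split(' '):
--             if not word in lexicon.keys():
--                 lexicon[word] = current_word
--                 current_word = current_word+1
--     return lexicon
-- ===== SOURCE B (Python) =====
-- def create_lexicon_for_the_words(list_words):
--     """Creates a lexicon to store each word"""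
--     tokens = [w for article in list_words for w in article.split(' ')]
--     first_pos = {w: p for p, w in reversed(list(enumerate(tokens)))}
--     by_position = sorted(first_pos.items(), key=lambda item: item[1])
--     return {w: i for i, (w, _) in enumerate(by_position)}
-- ===== Notes on version B (the rewrite author's own statement) =====
-- stated objective: alternative
-- what changed: Replaces A's single scan with a dict-membership guard and a running counter by a rank-by-first-position algorithm: build a word-to-position dict iterating the enumerated tokens in reverse (overwrites keep the earliest position), sort its items by position, and enumerate the ranks.
import Mathlib
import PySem

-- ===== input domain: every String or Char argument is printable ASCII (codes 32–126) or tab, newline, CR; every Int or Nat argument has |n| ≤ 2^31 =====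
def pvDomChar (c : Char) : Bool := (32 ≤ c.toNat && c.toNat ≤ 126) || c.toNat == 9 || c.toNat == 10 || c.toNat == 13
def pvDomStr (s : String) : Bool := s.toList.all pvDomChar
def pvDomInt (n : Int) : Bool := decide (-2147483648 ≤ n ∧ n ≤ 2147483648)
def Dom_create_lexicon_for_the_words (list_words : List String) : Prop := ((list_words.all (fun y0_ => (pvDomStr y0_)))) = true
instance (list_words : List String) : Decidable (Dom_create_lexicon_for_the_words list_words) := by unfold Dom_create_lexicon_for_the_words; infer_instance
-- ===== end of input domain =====

-- B replaces A's single scan with a membership guard and a counter by a rank-by-first-position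
-- algorithm: build a word→position dict back-to-front (overwrites keep the earliest position),
-- sort its items by position, and enumerate ranks; objective: alternative.

-- shared primitive: Python's s.split(' ') — split? is always 'some' since the separator " " is non-empty
def pySplitSpace (s : String) : List String := (PySem.Str.split? s " ").getD []

-- ===== PORT A =====
def create_lexicon_for_the_words (list_words : List String) : List (String × Int) :=
  (list_words.foldl
      (fun (st : PySem.Dict String Int × Int) article =>
        (pySplitSpace article).foldl
          (fun (st : PySem.Dict String Int × Int) word =>
            if st.1.contains word then st
            else (st.1.insert word st.2, st.2 + 1))
          st)
      (PySem.Dict.empty, 0)).1.items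

-- ===== PORT B =====
def create_lexicon_for_the_words_alt (list_words : List String) : List (String × Int) :=
  let tokens := list_words.flatMap pySplitSpace
  let first_pos := ((PySem.List.enumerate tokens 0).reverse).foldl
      (fun (d : PySem.Dict String Int) q => d.insert q.2 q.1) PySem.Dict.empty
  let by_position := PySem.List.sorted first_pos.items (fun item => item.2)
  (PySem.List.enumerate by_position 0).map (fun p => (p.2.1, p.1))

-- ===== PRECONDITION & SPEC =====
def Spec_create_lexicon_for_the_words (list_words : List String) (out : List (String × Int)) : Prop := out = create_lexicon_for_the_words_alt list_words
instance (list_words : List String) (out : List (String × Int)) : Decidable (Spec_create_lexicon_for_the_words list_words out) := by unfold Spec_create_lexicon_for_the_words; infer_instance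

-- ===== CLAIM (what is proved, stated in full; the proofs are below) =====
def Claim_equal_create_lexicon_for_the_words : Prop := ∀ (list_words : List String), Dom_create_lexicon_for_the_words list_words → Spec_create_lexicon_for_the_words list_words (create_lexicon_for_the_words list_words)

-- ===== LEMMAS AND PROOFS =====

-- ---------- A side: the dict A has built after registering exactly the (distinct, in order) words u ----------
def pvE (u : List String) : PySem.Dict String Int :=
  PySem.Dict.mk ((PySem.List.enumerate u 0).map (fun p => (p.2, p.1)))

theorem pvEnumerate_append_singleton (xs : List String) (x : String) (s : Int) :
    PySem.List.enumerate (xs ++ [x]) s = PySem.List.enumerate xs s ++ [(s + xs.length, x)] := by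
  induction xs generalizing s with
  | nil => simp [PySem.List.enumerate_nil, PySem.List.enumerate_cons]
  | cons y ys ih => simp [PySem.List.enumerate_cons, ih]; ring_nf

theorem pvE_keys (u : List String) : (pvE u).keys = u := by
  show (((PySem.List.enumerate u 0).map (fun p => (p.2, p.1))).map (·.1)) = u
  rw [List.map_map]
  exact PySem.List.map_snd_enumerate u 0

theorem pvE_nil : pvE [] = PySem.Dict.empty := by
  apply PySem.Dict.ext
  simp [pvE, PySem.List.enumerate_nil, PySem.Dict.empty]

theorem pvE_snoc (u : List String) (w : String) (hw : w ∉ u) :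
    (pvE u).insert w (u.length : Int) = pvE (u ++ [w]) := by
  apply PySem.Dict.ext
  have hc : (pvE u).contains w = false := by
    rw [← Bool.not_eq_true, PySem.Dict.contains_iff_mem_keys, pvE_keys]
    exact hw
  rw [PySem.Dict.items_insert_of_not_contains _ _ hc]
  show _ = ((PySem.List.enumerate (u ++ [w]) 0).map (fun p => (p.2, p.1)))
  rw [pvEnumerate_append_singleton, List.map_append]
  simp [pvE]

theorem pvLoop (ws u : List String) :
    ws.foldl
      (fun (st : PySem.Dict String Int × Int) word =>
        if st.1.contains word then st else (st.1.insert word st.2, st.2 + 1))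
      (pvE u, (u.length : Int))
    = (pvE (ws.foldl PySem.Set.add u), ((ws.foldl PySem.Set.add u).length : Int)) := by
  induction ws generalizing u with
  | nil => simp
  | cons w ws ih =>
    simp only [List.foldl_cons]
    by_cases h : w ∈ u
    · rw [if_pos (by rw [PySem.Dict.contains_iff_mem_keys, pvE_keys]; exact h),
        PySem.Set.add_of_mem h]
      exact ih u
    · rw [if_neg (by rw [PySem.Dict.contains_iff_mem_keys, pvE_keys]; exact h),
        PySem.Set.add_of_not_mem h]
      have := ih (u ++ [w])
      simp only [pvE_snoc u w h]
      simpa using this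

-- A's result, characterised: the first-appearance-ordered distinct words paired with 0,1,2,…
theorem pvA_eq (lw : List String) :
    create_lexicon_for_the_words lw
      = (PySem.List.enumerate (PySem.List.dedup (lw.flatMap pySplitSpace)) 0).map
          (fun p => (p.2, p.1)) := by
  unfold create_lexicon_for_the_words
  rw [← List.foldl_flatMap, ← pvE_nil]
  have h0 : (0 : Int) = (([] : List String).length : Int) := by simp
  rw [h0, pvLoop]
  simp only [PySem.List.dedup_eq_ofList, PySem.Set.ofList_eq_foldl]
  rfl

-- ---------- B side ----------
-- first position of w in ts (Python: the value first_pos[w])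
def pvF (ts : List String) (w : String) : Int :=
  ((List.find? (fun q => q.2 == w) (PySem.List.enumerate ts 0)).map (·.1)).getD 0

theorem pvEnum_shift (xs : List String) (s : Int) :
    PySem.List.enumerate xs s = (PySem.List.enumerate xs 0).map (fun q => (q.1 + s, q.2)) := by
  induction xs generalizing s with
  | nil => simp [PySem.List.enumerate_nil]
  | cons x xs ih =>
    rw [PySem.List.enumerate_cons, PySem.List.enumerate_cons, ih (s + 1), ih (0 + 1),
      List.map_cons, List.map_map]
    refine congrArg₂ List.cons (by simp) (List.map_congr_left ?_)
    intro a _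
    simp [Function.comp]
    ring

theorem pvF_find_some {ts : List String} {w : String} (hw : w ∈ ts) :
    ∃ q, List.find? (fun q => q.2 == w) (PySem.List.enumerate ts 0) = some q ∧ 0 ≤ q.1 := by
  obtain ⟨k, hk, hkw⟩ := List.mem_iff_getElem.mp hw
  have hmem : ((0 + (k : Int)), ts[k]) ∈ PySem.List.enumerate ts 0 :=
    (PySem.List.mem_enumerate_iff _ _ _).mpr ⟨k, hk, rfl⟩
  have hsome : (List.find? (fun q => q.2 == w) (PySem.List.enumerate ts 0)).isSome := by
    rw [List.find?_isSome]
    exact ⟨_, hmem, by simp [hkw]⟩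
  obtain ⟨q, hq⟩ := Option.isSome_iff_exists.mp hsome
  refine ⟨q, hq, ?_⟩
  have hqmem := List.mem_of_find?_eq_some hq
  obtain ⟨j, hj, hjq⟩ := (PySem.List.mem_enumerate_iff _ _ _).mp hqmem
  rw [hjq]
  simp

theorem pvF_nonneg {ts : List String} {w : String} (hw : w ∈ ts) : 0 ≤ pvF ts w := by
  obtain ⟨q, hq, hq0⟩ := pvF_find_some hw
  simp [pvF, hq, hq0]

theorem pvF_cons_self (t : String) (ts : List String) : pvF (t :: ts) t = 0 := by
  simp [pvF, PySem.List.enumerate_cons]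

theorem pvF_cons_ne {t w : String} {ts : List String} (h : w ≠ t) (hw : w ∈ ts) :
    pvF (t :: ts) w = pvF ts w + 1 := by
  obtain ⟨q, hq, _⟩ := pvF_find_some hw
  have hb : (((0 : Int), t).2 == w) = false := by
    simp only [beq_eq_false_iff_ne]
    exact fun hh => h hh.symm
  unfold pvF
  rw [PySem.List.enumerate_cons, List.find?_cons_of_neg (by simp [hb]),
    pvEnum_shift ts (0 + 1), List.find?_map]
  have hcomp : ((fun q : Int × String => q.2 == w) ∘ fun q : Int × String => (q.1 + (0 + 1), q.2))
      = fun q : Int × String => q.2 == w := rfl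
  rw [hcomp, hq]
  simp

-- pvF is strictly increasing along the first-appearance order
theorem pvG (ts : List String) :
    ((PySem.List.dedup ts).map (fun w => (w, pvF ts w))).Pairwise (fun a b => a.2 < b.2) := by
  induction ts with
  | nil => simp [PySem.List.dedup_eq_ofList, PySem.Set.ofList_nil]
  | cons t ts ih =>
    simp only [PySem.List.dedup_eq_ofList] at ih ⊢
    rw [PySem.Set.ofList_cons]
    have hmem : ∀ w ∈ PySem.Set.discard (PySem.Set.ofList ts) t, w ∈ ts ∧ w ≠ t := by
      intro w hwmem
      obtain ⟨hw1, hw2⟩ := (PySem.Set.mem_discard _ _ _).mp hwmem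
      exact ⟨(PySem.Set.mem_ofList _ _).mp hw1, hw2⟩
    rw [List.map_cons, List.pairwise_cons]
    constructor
    · intro b hb
      obtain ⟨w, hwmem, hwb⟩ := List.mem_map.mp hb
      obtain ⟨hw1, hw2⟩ := hmem w hwmem
      rw [← hwb]
      simp only [pvF_cons_self, pvF_cons_ne hw2 hw1]
      have := pvF_nonneg hw1
      omega
    · have hcg : (PySem.Set.discard (PySem.Set.ofList ts) t).map (fun w => (w, pvF (t :: ts) w))
          = (PySem.Set.discard (PySem.Set.ofList ts) t).map
              ((fun p : String × Int => (p.1, p.2 + 1)) ∘ (fun w => (w, pvF ts w))) := by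
        apply List.map_congr_left
        intro w hwmem
        obtain ⟨hw1, hw2⟩ := hmem w hwmem
        simp [Function.comp, pvF_cons_ne hw2 hw1]
      have hsub0 : List.Sublist (PySem.Set.discard (PySem.Set.ofList ts) t) (PySem.Set.ofList ts) :=
        List.filter_sublist
      have hpw := ih.sublist (List.Sublist.map (fun w => (w, pvF ts w)) hsub0)
      rw [hcg, ← List.map_map, List.pairwise_map]
      refine hpw.imp ?_
      intro a b hab
      dsimp only
      omega

-- the back-to-front dict build: a lookup is the FIRST matching pair of the original order
theorem pvGetFold (l : List (Int × String)) (d : PySem.Dict String Int) (w : String) :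
    ((l.foldl (fun d q => d.insert q.2 q.1) d).get? w)
      = ((List.find? (fun q => q.2 == w) l.reverse).map (·.1)).or (d.get? w) := by
  induction l generalizing d with
  | nil => simp
  | cons q l ih =>
    rw [List.foldl_cons, ih, List.reverse_cons, List.find?_append, Option.map_or, Option.or_assoc]
    congr 1
    by_cases h : q.2 = w
    · have hb : (q.2 == w) = true := by simp [h]
      simp [h.symm]
    · have hb : (q.2 == w) = false := by simp [h]
      have hne : ¬ w = q.2 := fun hh => h hh.symm
      simp [hb, PySem.Dict.get?_insert, hne]

theorem pvB_eq (lw : List String) :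
    create_lexicon_for_the_words_alt lw
      = (PySem.List.enumerate (PySem.List.dedup (lw.flatMap pySplitSpace)) 0).map
          (fun p => (p.2, p.1)) := by
  show (PySem.List.enumerate
      (PySem.List.sorted
        (((PySem.List.enumerate (lw.flatMap pySplitSpace) 0).reverse).foldl
            (fun (d : PySem.Dict String Int) q => d.insert q.2 q.1) PySem.Dict.empty).items
        (fun item => item.2)) 0).map (fun p => (p.2.1, p.1))
    = (PySem.List.enumerate (PySem.List.dedup (lw.flatMap pySplitSpace)) 0).map
        (fun p => (p.2, p.1))
  set ts := lw.flatMap pySplitSpace with hts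
  set d := ((PySem.List.enumerate ts 0).reverse).foldl
      (fun (d : PySem.Dict String Int) q => d.insert q.2 q.1) PySem.Dict.empty with hd
  -- keys of d
  have hkeys : d.keys = PySem.Set.ofList ts.reverse := by
    rw [hd, PySem.Dict.keys_foldl_insert_key _ (fun q : Int × String => q.2) (fun _ q => q.1)]
    rw [PySem.Dict.keys_empty, PySem.Set.update_nil_left, List.map_reverse,
      PySem.List.map_snd_enumerate]
  have hnd : d.keys.Nodup := by rw [hkeys]; exact PySem.Set.nodup_ofList ts.reverse
  -- lookups in d
  have hget : ∀ w ∈ ts, d.get? w = some (pvF ts w) := by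
    intro w hw
    rw [hd, pvGetFold, List.reverse_reverse, PySem.Dict.get?_empty, Option.or_none]
    obtain ⟨q, hq, _⟩ := pvF_find_some hw
    simp [pvF, hq]
  -- items of d: the distinct words (in last-to-first order) with their first positions
  have hitems : d.items = (PySem.Set.ofList ts.reverse).map (fun w => (w, pvF ts w)) := by
    rw [PySem.Dict.items_eq_map_keys d hnd 0, hkeys]
    apply List.map_congr_left
    intro w hwmem
    have hwts : w ∈ ts := List.mem_reverse.mp ((PySem.Set.mem_ofList _ _).mp hwmem)
    rw [PySem.Dict.getD_eq_get?_getD, hget w hwts]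
    rfl
  -- sorting by position recovers the first-appearance order
  have hperm : ((PySem.List.dedup ts).map (fun w => (w, pvF ts w))).Perm d.items := by
    rw [hitems]
    apply List.Perm.map
    have hnd1 : (PySem.List.dedup ts).Nodup := by
      rw [PySem.List.dedup_eq_ofList]
      exact PySem.Set.nodup_ofList ts
    rw [List.perm_ext_iff_of_nodup hnd1 (PySem.Set.nodup_ofList ts.reverse)]
    intro a
    rw [PySem.List.mem_dedup, PySem.Set.mem_ofList, List.mem_reverse]
  have hsorted : PySem.List.sorted d.items (fun item : String × Int => item.2)
      = (PySem.List.dedup ts).map (fun w => (w, pvF ts w)) :=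
    PySem.List.sorted_eq_of_perm_of_pairwise_lt _ _ _ hperm (pvG ts)
  rw [hsorted]
  -- enumerating the sorted pairs and keeping (word, rank) is enumerate-of-dedup swapped
  have henum : ∀ (l : List String) (s : Int),
      PySem.List.enumerate (l.map (fun w => (w, pvF ts w))) s
        = (PySem.List.enumerate l s).map (fun p => (p.1, (p.2, pvF ts p.2))) := by
    intro l
    induction l with
    | nil => intro s; simp [PySem.List.enumerate_nil]
    | cons x xs ih => intro s; simp [PySem.List.enumerate_cons, ih]
  rw [henum, List.map_map]
  rfl

-- ===== VERDICT (by name: the statement is the Claim_ definition above) =====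
theorem create_lexicon_for_the_words_spec : Claim_equal_create_lexicon_for_the_words := by
  intro lw _
  show create_lexicon_for_the_words lw = create_lexicon_for_the_words_alt lw
  rw [pvA_eq, pvB_eq]
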